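-- pv_equiv track=rewrite | github.com/The-devop/Cipher-Labs | crypto_core.py | gap_cipher
-- ===== SOURCE A (Python) =====
-- def _clean(text: str) -> str:
--     """Convert text to uppercase"""
--     return text.upper()
--
-- def gap_cipher(text: str) -> str:
--     """Remove vowels, replace with position"""
--     vowels = "AEIOU"
--     result = []
--     for i, ch in enumerate(_clean(text)):
--         if ch in vowels:
--             result.append(str(i))
--         else:
--             result.append(ch)
--     return "".join(result)
-- ===== SOURCE B (Python) =====
-- def _clean(text: str) -> str:
--     """Convert text to uppercase"""
--     return text.upper()
--
-- def gap_cipher(text: str) -> str: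
--     """Remove vowels, replace with position"""
--     cleaned = _clean(text)
--     positions = [i for i, ch in enumerate(cleaned) if ch in "AEIOU"]
--     pieces = []
--     prev = 0
--     for i in positions:
--         pieces.append(cleaned[prev:i])
--         pieces.append(str(i))
--         prev = i + 1
--     pieces.append(cleaned[prev:])
--     return "".join(pieces)
-- ===== Notes on version B (the rewrite author's own statement) =====
-- stated objective: alternative
-- what changed: B first collects the vowel positions, then splices the result together from the untouched slices between vowels plus the position digits, instead of A's per-character loop that rebuilds every character into an accumulator.
import Mathlib
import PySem

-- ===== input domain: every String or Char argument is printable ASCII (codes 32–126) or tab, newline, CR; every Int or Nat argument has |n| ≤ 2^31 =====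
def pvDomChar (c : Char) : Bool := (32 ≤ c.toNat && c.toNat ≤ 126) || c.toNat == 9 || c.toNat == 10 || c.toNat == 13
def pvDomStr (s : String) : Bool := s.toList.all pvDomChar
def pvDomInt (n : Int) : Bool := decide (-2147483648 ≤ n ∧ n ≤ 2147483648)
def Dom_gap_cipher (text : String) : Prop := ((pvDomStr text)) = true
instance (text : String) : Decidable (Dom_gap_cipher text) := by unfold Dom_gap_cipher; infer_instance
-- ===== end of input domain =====

-- B splices the output from the unchanged stretches between vowels (collected first) instead of
-- A's per-character accumulator loop; same cost, alternative structure.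

-- ===== PORT A =====
-- vowels = "AEIOU" (shared constant)
def pvVowels : List Char := ['A', 'E', 'I', 'O', 'U']

def gap_cipher (text : String) : String :=
  -- cleaned = _clean(text) inlined as (PySem.Str.upper text).toList
  String.ofList ((PySem.List.enumerate (PySem.Str.upper text).toList 0).foldl
    (fun result p =>
      if p.2 ∈ pvVowels then result ++ PySem.Int.toChars p.1 else result ++ [p.2]) [])

-- ===== PORT B =====
-- the loop 'for i in positions: pieces += [cleaned[prev:i], str(i)]; prev = i+1' plus the final
-- 'pieces.append(cleaned[prev:])', with "".join rendered as concatenation of the pieces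
def gcSplice (cs : List Char) : List Int → Int → List Char
  | [], prev => PySem.List.slice cs (some prev) none
  | i :: rest, prev =>
      PySem.List.slice cs (some prev) (some i) ++ PySem.Int.toChars i ++ gcSplice cs rest (i + 1)

def gap_cipher_alt (text : String) : String :=
  -- cleaned and positions inlined
  String.ofList (gcSplice (PySem.Str.upper text).toList
    (((PySem.List.enumerate (PySem.Str.upper text).toList 0).filter
      (fun p => p.2 ∈ pvVowels)).map (·.1)) 0)

-- ===== PRECONDITION & SPEC =====
def Spec_gap_cipher (text : String) (out : String) : Prop := out = gap_cipher_alt text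
instance (text : String) (out : String) : Decidable (Spec_gap_cipher text out) := by unfold Spec_gap_cipher; infer_instance

-- ===== CLAIM (what is proved, stated in full; the proofs are below) =====
def Claim_equal_gap_cipher : Prop := ∀ (text : String), Dom_gap_cipher text → Spec_gap_cipher text (gap_cipher text)

-- ===== LEMMAS AND PROOFS =====

-- the common value: per-entry expansion of an enumerated character
def gcPiece (p : Int × Char) : List Char :=
  if p.2 ∈ pvVowels then PySem.Int.toChars p.1 else [p.2]

lemma foldA (l : List (Int × Char)) (init : List Char) :
    l.foldl (fun result p =>
      if p.2 ∈ pvVowels then result ++ PySem.Int.toChars p.1 else result ++ [p.2]) init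
      = init ++ l.flatMap gcPiece := by
  induction l generalizing init with
  | nil => simp
  | cons x xs ih =>
      simp only [List.foldl_cons, List.flatMap_cons, gcPiece]
      split_ifs with h <;> simp [ih]

-- one step of gcSplice past a non-vowel position
lemma gcSplice_step (cs : List Char) (P : List Int) (prev : Nat)
    (hlen : prev < cs.length) (hP : ∀ i ∈ P, ((prev : Int)) < i) :
    gcSplice cs P (prev : Int) = cs[prev] :: gcSplice cs P ((prev : Int) + 1) := by
  cases P with
  | nil =>
      have h1 : ((prev : Int)) + 1 = ((prev + 1 : Nat) : Int) := by push_cast; ring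
      simp only [gcSplice, h1, PySem.List.slice_from_natCast]
      rw [List.drop_eq_getElem_cons hlen]
  | cons i rest =>
      have hi : ((prev : Int)) < i := hP i (by simp)
      obtain ⟨k, hk⟩ : ∃ k : Nat, i = ((prev + 1 + k : Nat) : Int) := by
        refine ⟨(i - prev - 1).toNat, ?_⟩
        have : 0 ≤ i - prev - 1 := by omega
        push_cast [Int.toNat_of_nonneg this]; ring
      have h1 : ((prev : Int)) + 1 = ((prev + 1 : Nat) : Int) := by push_cast; ring
      have h2 : prev + 1 + k - prev = k + 1 := by omega
      have h3 : prev + 1 + k - (prev + 1) = k := by omega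
      simp only [gcSplice, hk, h1, PySem.List.slice_natCast, h2, h3]
      rw [List.drop_eq_getElem_cons hlen, List.take_succ_cons]
      simp

-- main invariant: splicing the vowel positions of the suffix ds = cs.drop prev reproduces
-- the flatMap expansion of that suffix
lemma gcSplice_main (ds : List Char) (prev : Nat) (cs : List Char)
    (hdrop : cs.drop prev = ds) :
    gcSplice cs (((PySem.List.enumerate ds (prev : Int)).filter
        (fun p => p.2 ∈ pvVowels)).map (·.1)) (prev : Int)
      = (PySem.List.enumerate ds (prev : Int)).flatMap gcPiece := by
  induction ds generalizing prev with
  | nil =>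
      simp [PySem.List.enumerate_nil, gcSplice, PySem.List.slice_from_natCast, hdrop]
  | cons d ds' ih =>
      have hlen : prev < cs.length := by
        have := congrArg List.length hdrop
        simp at this; omega
      have hget : cs[prev] = d := by
        have := congrArg (fun l => l[0]?) hdrop
        simp [List.getElem?_drop] at this
        simpa [List.getElem?_eq_getElem hlen] using this
      have hdrop' : cs.drop (prev + 1) = ds' := by
        have := congrArg List.tail hdrop
        simpa [List.tail_drop] using this
      have h1 : ((prev : Int)) + 1 = ((prev + 1 : Nat) : Int) := by push_cast; ring
      rw [PySem.List.enumerate_cons]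
      by_cases hv : d ∈ pvVowels
      · rw [List.filter_cons_of_pos (by simpa using hv)]
        simp only [List.map_cons, List.flatMap_cons, gcSplice]
        have hslice : PySem.List.slice cs (some (prev : Int)) (some (prev : Int)) = [] := by
          rw [PySem.List.slice_natCast]; simp
        rw [hslice, h1, ih (prev + 1) hdrop']
        simp [gcPiece, hv]
      · rw [List.filter_cons_of_neg (by simpa using hv)]
        simp only [List.flatMap_cons]
        have hgt : ∀ i ∈ ((PySem.List.enumerate ds' ((prev : Int) + 1)).filter
            (fun p => p.2 ∈ pvVowels)).map (·.1), ((prev : Int)) < i := by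
          intro i hi
          simp only [List.mem_map, List.mem_filter] at hi
          obtain ⟨p, ⟨hp, _⟩, rfl⟩ := hi
          rw [PySem.List.mem_enumerate_iff] at hp
          obtain ⟨k, hk, rfl⟩ := hp
          simp; omega
        rw [gcSplice_step cs _ prev hlen hgt, h1, ih (prev + 1) hdrop', hget]
        simp [gcPiece, hv]

-- ===== VERDICT (by name: the statement is the Claim_ definition above) =====
theorem gap_cipher_spec : Claim_equal_gap_cipher := by
  intro text _
  unfold Spec_gap_cipher gap_cipher gap_cipher_alt
  have h0 : ((0 : Nat) : Int) = 0 := rfl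
  rw [foldA, List.nil_append, ← h0,
    gcSplice_main ((PySem.Str.upper text).toList) 0 ((PySem.Str.upper text).toList) (by simp)]
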